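-- pv_equiv track=rewrite | github.com/DiZhang-XDU/sleepstager-twobranch | data/read_data.py | getExistChn
-- ===== SOURCE A (Python) =====
-- def getExistChn(chnNameTable, rawChns):
--     chnNames = [None]*5
--     for i in range(len(chnNameTable)):# C3,C4,F3,....
--         if chnNameTable[i]:
--             found = False
--             for name in chnNameTable[i]:
--                 for rcn in rawChns:
--                     if rcn.upper() == name.upper():
--                         chnNames[i] = rcn;found = True;break
--                 if found:break
--     return chnNames
-- ===== SOURCE B (Python) =====
-- def getExistChn(chnNameTable, rawChns):
--     # inverted index: uppercased candidate name -> list of (slot, priority) pairs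
--     want = {}
--     for i, cands in enumerate(chnNameTable):
--         for j, name in enumerate(cands):
--             want.setdefault(name.upper(), []).append((i, j))
--     # one pass over the raw channels, keeping per slot the match of lowest priority
--     # (first raw channel wins ties, since we only replace on strictly smaller priority)
--     best = {}
--     for rcn in rawChns:
--         for i, j in want.get(rcn.upper(), []):
--             if i not in best or j < best[i][0]:
--                 best[i] = (j, rcn)
--     chnNames = [None] * 5
--     for i, (j, rcn) in best.items():
--         chnNames[i] = rcn
--     return chnNames
-- ===== Notes on version B (the rewrite author's own statement) =====
-- stated objective: alternative
-- what changed: B replaces A's per-slot nested scans by an inverted index (uppercased candidate name -> list of (slot, priority) pairs) and a single pass over rawChns that keeps, per slot, the match of lowest candidate priority (first raw channel wins ties), then writes the kept winners into the 5-slot list.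
-- outside the precondition, e.g. on getExistChn([[], [], [], [], [], ['C3']], ['c3']): A raises IndexError, B raises IndexError
import Mathlib
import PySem

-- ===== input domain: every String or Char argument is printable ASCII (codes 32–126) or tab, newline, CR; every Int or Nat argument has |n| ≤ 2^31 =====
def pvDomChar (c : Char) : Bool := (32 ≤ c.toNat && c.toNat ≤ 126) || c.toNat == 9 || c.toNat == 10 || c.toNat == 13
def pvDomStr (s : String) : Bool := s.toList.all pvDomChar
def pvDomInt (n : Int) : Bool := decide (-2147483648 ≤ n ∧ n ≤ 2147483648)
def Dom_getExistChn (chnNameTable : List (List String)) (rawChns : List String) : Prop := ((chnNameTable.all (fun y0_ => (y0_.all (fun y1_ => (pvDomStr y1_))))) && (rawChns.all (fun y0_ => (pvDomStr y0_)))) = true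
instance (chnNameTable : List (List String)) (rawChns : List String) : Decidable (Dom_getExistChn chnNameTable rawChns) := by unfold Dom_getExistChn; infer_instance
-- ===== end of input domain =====

-- B inverts the search: it builds an inverted index from uppercased candidate name to
-- (slot, priority) pairs, then makes ONE pass over rawChns keeping per slot the match of
-- lowest priority (alternative algorithm; A nests a per-slot, per-candidate scan of rawChns).


-- ===== PORT A =====
-- inner 'for rcn in rawChns' loop: first rcn whose upper() equals name.upper()
def aScanRaw (name : String) (rcns : List String) : Option String :=
  match rcns with
  | [] => none
  | r :: rs => if PySem.Str.upper r == PySem.Str.upper name then some r else aScanRaw name rs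

-- 'for name in chnNameTable[i]' loop with the 'found' flag (some = found, break)
def aScanNames (cands : List String) (rcns : List String) : Option String :=
  match cands with
  | [] => none
  | n :: ns =>
    match aScanRaw n rcns with
    | some r => some r
    | none => aScanNames ns rcns

def getExistChn (chnNameTable : List (List String)) (rawChns : List String) : List (Option String) :=
  (PySem.List.enumerate chnNameTable).foldl
    (fun chnNames p =>
      if p.2 ≠ [] then
        match aScanNames p.2 rawChns with
        | some r => chnNames.set p.1.toNat (some r)
        | none => chnNames
      else chnNames)
    [none, none, none, none, none]

-- ===== PORT B =====
-- want.setdefault(name.upper(), []).append((i, j)) over both enumerations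
def bBuildWant (chnNameTable : List (List String)) : PySem.Dict String (List (Int × Int)) :=
  (PySem.List.enumerate chnNameTable).foldl
    (fun w p => (PySem.List.enumerate p.2).foldl
      (fun w q => w.modify (PySem.Str.upper q.2) [] (· ++ [(p.1, q.1)])) w)
    PySem.Dict.empty

-- 'if i not in best or j < best[i][0]: best[i] = (j, rcn)'
def bInnerUpd (rcn : String) (best : PySem.Dict Int (Int × String)) (p : Int × Int) :
    PySem.Dict Int (Int × String) :=
  match best.get? p.1 with
  | none => best.insert p.1 (p.2, rcn)
  | some cur => if p.2 < cur.1 then best.insert p.1 (p.2, rcn) else best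

-- single pass over rawChns; inner loop over want.get(rcn.upper(), [])
def bBuildBest (want : PySem.Dict String (List (Int × Int))) (rawChns : List String) :
    PySem.Dict Int (Int × String) :=
  rawChns.foldl
    (fun best rcn => (want.getD (PySem.Str.upper rcn) []).foldl (bInnerUpd rcn) best)
    PySem.Dict.empty

def getExistChn_alt (chnNameTable : List (List String)) (rawChns : List String) : List (Option String) :=
  let want := bBuildWant chnNameTable
  let best := bBuildBest want rawChns
  best.items.foldl (fun chnNames p => chnNames.set p.1.toNat (some p.2.2))
    [none, none, none, none, none]

-- ===== PRECONDITION & SPEC =====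
-- Pre_ excludes exactly the inputs on which A raises IndexError: a table entry at index ≥ 5
-- containing a candidate name that matches some raw channel name case-insensitively.
def Pre_getExistChn (chnNameTable : List (List String)) (rawChns : List String) : Prop :=
  ∀ cands ∈ chnNameTable.drop 5, ∀ name ∈ cands, ∀ rcn ∈ rawChns,
    PySem.Str.upper rcn ≠ PySem.Str.upper name
instance (chnNameTable : List (List String)) (rawChns : List String) : Decidable (Pre_getExistChn chnNameTable rawChns) := by unfold Pre_getExistChn; infer_instance
def pvWitness_getExistChn : List (List String) × List String := ([["C3", "c4"], []], ["c3", "EEG C4"])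
def Spec_getExistChn (chnNameTable : List (List String)) (rawChns : List String) (out : List (Option String)) : Prop := out = getExistChn_alt chnNameTable rawChns
instance (chnNameTable : List (List String)) (rawChns : List String) (out : List (Option String)) : Decidable (Spec_getExistChn chnNameTable rawChns out) := by unfold Spec_getExistChn; infer_instance

-- ===== CLAIM (what is proved, stated in full; the proofs are below) =====
def Claim_equal_getExistChn : Prop := ∀ (chnNameTable : List (List String)) (rawChns : List String), Dom_getExistChn chnNameTable rawChns → Pre_getExistChn chnNameTable rawChns → Spec_getExistChn chnNameTable rawChns (getExistChn chnNameTable rawChns)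

-- ===== LEMMAS AND PROOFS =====

-- B's per-slot state update ('keep the strictly smaller priority, first raw wins ties')
def updB (cur : Option (Int × String)) (j : Int) (rcn : String) : Option (Int × String) :=
  match cur with
  | none => some (j, rcn)
  | some c => if j < c.1 then some (j, rcn) else cur

-- priorities of the candidates of one slot (starting at offset o) matching rcn
def jsList (cands : List String) (rcn : String) (o : Int) : List Int :=
  (PySem.List.enumerate cands o).filterMap
    (fun q => if PySem.Str.upper q.2 == PySem.Str.upper rcn then some q.1 else none)

-- B's per-slot computation, raws-major
def foldBo (cands : List String) (raws : List String) (o : Int) (cur : Option (Int × String)) :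
    Option (Int × String) :=
  raws.foldl (fun cur rcn => (jsList cands rcn o).foldl (fun cur j => updB cur j rcn) cur) cur

-- index-aware version of A's per-slot scan
def aIdx (cands : List String) (raws : List String) (o : Int) : Option (Int × String) :=
  match cands with
  | [] => none
  | n :: ns =>
    match aScanRaw n raws with
    | some r => some (o, r)
    | none => aIdx ns raws (o + 1)

-- merge of one raw's best priority with the best of the remaining raws
def mergeL (r : String) (m? : Option Int) (a : Option (Int × String)) : Option (Int × String) :=
  match m?, a with
  | none, a => a
  | some m, none => some (m, r)
  | some m, some c => if m ≤ c.1 then some (m, r) else some c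

theorem aIdx_map (cands raws : List String) (o : Int) :
    (aIdx cands raws o).map (·.2) = aScanNames cands raws := by
  induction cands generalizing o with
  | nil => rfl
  | cons n ns ih =>
    simp only [aIdx, aScanNames]
    cases aScanRaw n raws <;> simp [ih]

theorem aIdx_lb (cands raws : List String) (o : Int) (c : Int × String)
    (h : aIdx cands raws o = some c) : o ≤ c.1 := by
  induction cands generalizing o with
  | nil => simp [aIdx] at h
  | cons n ns ih =>
    simp only [aIdx] at h
    cases hs : aScanRaw n raws with
    | some r => rw [hs] at h; cases h; simp
    | none => rw [hs] at h; have := ih (o + 1) h; omega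

theorem jsList_lb (cands : List String) (rcn : String) (o j : Int) (h : j ∈ jsList cands rcn o) :
    o ≤ j := by
  simp only [jsList, List.mem_filterMap] at h
  obtain ⟨q, hq, hj⟩ := h
  rw [PySem.List.mem_enumerate_iff] at hq
  obtain ⟨k, hk, rfl⟩ := hq
  split at hj
  · cases hj; omega
  · cases hj

theorem jsList_pairwise (cands : List String) (rcn : String) (o : Int) :
    (jsList cands rcn o).Pairwise (· < ·) := by
  apply List.Pairwise.filterMap _ _ (PySem.List.pairwise_lt_enumerate cands o)
  intro a a' hlt b hb b' hb'
  split at hb <;> cases hb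
  split at hb' <;> cases hb'
  exact hlt

theorem foldUpd_keep (js : List Int) (rcn : String) (c : Int × String)
    (h : ∀ j ∈ js, c.1 ≤ j) :
    js.foldl (fun cur j => updB cur j rcn) (some c) = some c := by
  induction js with
  | nil => rfl
  | cons j js ih =>
    have hj : ¬ j < c.1 := by have := h j (by simp); omega
    simp only [List.foldl_cons, updB, if_neg hj]
    exact ih fun j hj => h j (by simp [hj])

theorem foldUpd_char (js : List Int) (rcn : String) (cur : Option (Int × String))
    (hs : js.Pairwise (· < ·)) :
    js.foldl (fun cur j => updB cur j rcn) cur =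
      match js.head? with
      | none => cur
      | some m => updB cur m rcn := by
  cases js with
  | nil => rfl
  | cons m rest =>
    simp only [List.foldl_cons, List.head?_cons]
    have hrest : ∀ j ∈ rest, m ≤ j := by
      intro j hj
      have := (List.pairwise_cons.mp hs).1 j hj
      omega
    cases cur with
    | none =>
      simp only [updB]
      exact foldUpd_keep rest rcn (m, rcn) (by simpa using hrest)
    | some c =>
      simp only [updB]
      by_cases hc : m < c.1
      · rw [if_pos hc]
        exact foldUpd_keep rest rcn (m, rcn) (by simpa using hrest)
      · rw [if_neg hc]
        exact foldUpd_keep rest rcn c (by intro j hj; have := hrest j hj; omega)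

theorem foldBo_cons (cands : List String) (r : String) (rs : List String) (o : Int)
    (cur : Option (Int × String)) :
    foldBo cands (r :: rs) o cur =
      foldBo cands rs o ((jsList cands r o).foldl (fun cur j => updB cur j r) cur) := rfl

theorem crossStep (r : String) (rs : List String) (cands : List String) (o : Int) :
    aIdx cands (r :: rs) o = mergeL r (jsList cands r o).head? (aIdx cands rs o) := by
  induction cands generalizing o with
  | nil => rfl
  | cons n ns ih =>
    cases hb : (PySem.Str.upper n == PySem.Str.upper r) with
    | true =>
      have hEq : PySem.Str.upper n = PySem.Str.upper r := eq_of_beq hb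
      have hjs : jsList (n :: ns) r o = o :: jsList ns r (o + 1) := by
        simp [jsList, PySem.List.enumerate_cons, hEq]
      have hA : aIdx (n :: ns) (r :: rs) o = some (o, r) := by
        simp [aIdx, aScanRaw, hEq]
      rw [hA, hjs]
      cases hx : aIdx (n :: ns) rs o with
      | none => simp [mergeL]
      | some c =>
        have := aIdx_lb _ _ _ _ hx
        simp [mergeL, this]
    | false =>
      have hNe : ¬ PySem.Str.upper n = PySem.Str.upper r := by simpa using hb
      have hjs : jsList (n :: ns) r o = jsList ns r (o + 1) := by
        simp [jsList, PySem.List.enumerate_cons, hNe]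
      have hNe' : PySem.Str.upper r ≠ PySem.Str.upper n := fun h => hNe h.symm
      have hscan : aScanRaw n (r :: rs) = aScanRaw n rs := by
        simp [aScanRaw, hNe']
      cases hn : aScanRaw n rs with
      | some r' =>
        have hA : aIdx (n :: ns) (r :: rs) o = some (o, r') := by
          simp [aIdx, hscan, hn]
        have hA' : aIdx (n :: ns) rs o = some (o, r') := by
          simp [aIdx, hn]
        rw [hA, hA', hjs]
        cases hh : (jsList ns r (o + 1)).head? with
        | none => simp [mergeL]
        | some m =>
          have hm : o + 1 ≤ m := jsList_lb _ _ _ _ (List.mem_of_mem_head? hh)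
          simp [mergeL, show ¬ m ≤ o by omega]
      | none =>
        have hA : aIdx (n :: ns) (r :: rs) o = aIdx ns (r :: rs) (o + 1) := by
          simp [aIdx, hscan, hn]
        have hA' : aIdx (n :: ns) rs o = aIdx ns rs (o + 1) := by
          simp [aIdx, hn]
        rw [hA, hA', hjs, ih]
theorem foldBo_some (cands raws : List String) (o : Int) (c : Int × String) :
    foldBo cands raws o (some c) =
      match foldBo cands raws o none with
      | none => some c
      | some b => if b.1 < c.1 then some b else some c := by
  induction raws generalizing c with
  | nil => rfl
  | cons r rs ih =>
    rw [foldBo_cons, foldBo_cons,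
        foldUpd_char _ _ _ (jsList_pairwise cands r o),
        foldUpd_char _ _ _ (jsList_pairwise cands r o)]
    cases hh : (jsList cands r o).head? with
    | none => exact ih c
    | some m =>
      simp only [updB]
      by_cases hc : m < c.1
      · rw [if_pos hc, ih (m, r)]
        cases hG : foldBo cands rs o none with
        | none => simp [hc]
        | some b =>
          by_cases hb : b.1 < m <;> simp only [hb, if_true, if_false] <;>
            split_ifs <;> (try rfl) <;> (exfalso; omega)
      · rw [if_neg hc, ih c, ih (m, r)]
        cases hG : foldBo cands rs o none with
        | none => simp [hc]
        | some b =>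
          by_cases hb : b.1 < m <;> simp only [hb, if_true, if_false] <;>
            split_ifs <;> (try rfl) <;> (exfalso; omega)

theorem aIdx_eq_foldBo (cands raws : List String) (o : Int) :
    aIdx cands raws o = foldBo cands raws o none := by
  induction raws with
  | nil =>
    have : ∀ cs o', aIdx cs ([] : List String) o' = none := by
      intro cs
      induction cs with
      | nil => intro o'; rfl
      | cons n ns ihn => intro o'; simpa [aIdx, aScanRaw] using ihn (o' + 1)
    simp [foldBo, this]
  | cons r rs ih =>
    rw [crossStep, ih, foldBo_cons, foldUpd_char _ _ _ (jsList_pairwise cands r o)]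
    cases hh : (jsList cands r o).head? with
    | none => simp [mergeL]
    | some m =>
      simp only [updB]
      rw [foldBo_some]
      cases hG : foldBo cands rs o none with
      | none => simp [mergeL]
      | some b =>
        simp only [mergeL]
        split_ifs <;> (try rfl) <;> (exfalso; omega)
-- ---- want characterization ----
def wantPairs (tbl : List (List String)) : List (String × (Int × Int)) :=
  (PySem.List.enumerate tbl).flatMap
    (fun p => (PySem.List.enumerate p.2).map (fun q => (PySem.Str.upper q.2, (p.1, q.1))))

theorem bBuildWant_eq (tbl : List (List String)) :
    bBuildWant tbl =
      (wantPairs tbl).foldl (fun d p => d.modify p.1 [] (· ++ [p.2])) PySem.Dict.empty := by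
  unfold bBuildWant wantPairs
  rw [List.foldl_flatMap]
  simp only [List.foldl_map]

theorem want_getD (tbl : List (List String)) (K : String) :
    (bBuildWant tbl).getD K [] = ((wantPairs tbl).filter (fun p => p.1 == K)).map (·.2) := by
  rw [bBuildWant_eq, PySem.Dict.getD_foldl_modify_append]
  simp [PySem.Dict.getD_empty]

-- ---- per-key projection of the inner and outer folds of bBuildBest ----
theorem inner_get? (rcn : String) (wl : List (Int × Int)) (best : PySem.Dict Int (Int × String))
    (i : Int) :
    (wl.foldl (bInnerUpd rcn) best).get? i =
      ((wl.filter (fun p => p.1 == i)).map (·.2)).foldl (fun cur j => updB cur j rcn)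
        (best.get? i) := by
  induction wl generalizing best with
  | nil => rfl
  | cons p ps ih =>
    simp only [List.foldl_cons, List.filter_cons]
    by_cases hp : p.1 = i
    · simp only [hp, beq_self_eq_true, if_true, List.map_cons, List.foldl_cons]
      rw [ih]
      congr 1
      unfold bInnerUpd updB
      rw [← hp]
      cases hg : best.get? p.1 with
      | none => simp
      | some c =>
        by_cases hlt : p.2 < c.1
        · simp [hlt]
        · simp [hlt, hg]
    · have hb : (p.1 == i) = false := by simpa using hp
      simp only [hb]
      rw [ih]
      congr 1
      unfold bInnerUpd
      cases hg : best.get? p.1 with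
      | none => rw [PySem.Dict.get?_insert, if_neg (fun h : i = p.1 => hp h.symm)]
      | some c =>
        simp only []
        by_cases hlt : p.2 < c.1
        · rw [if_pos hlt, PySem.Dict.get?_insert, if_neg (fun h : i = p.1 => hp h.symm)]
        · rw [if_neg hlt]

theorem best_get? (want : PySem.Dict String (List (Int × Int))) (raws : List String) (i : Int) :
    (bBuildBest want raws).get? i =
      raws.foldl (fun cur rcn =>
        (((want.getD (PySem.Str.upper rcn) []).filter (fun p => p.1 == i)).map (·.2)).foldl
          (fun cur j => updB cur j rcn) cur) none := by
  unfold bBuildBest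
  have h : ∀ (b : PySem.Dict Int (Int × String)),
      (raws.foldl (fun best rcn => (want.getD (PySem.Str.upper rcn) []).foldl (bInnerUpd rcn) best) b).get? i =
        raws.foldl (fun cur rcn =>
          (((want.getD (PySem.Str.upper rcn) []).filter (fun p => p.1 == i)).map (·.2)).foldl
            (fun cur j => updB cur j rcn) cur) (b.get? i) := by
    induction raws with
    | nil => intro b; rfl
    | cons r rs ih =>
      intro b
      simp only [List.foldl_cons]
      rw [ih, inner_get?]
  rw [h]
  simp [PySem.Dict.get?_empty]

-- ---- selecting the one slot i out of the flattened want pairs ----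
theorem blockEq (cs : List String) (oc s i : Int) (K : String) :
    (((((PySem.List.enumerate cs oc).map (fun q => (PySem.Str.upper q.2, (s, q.1)))).filter
          (fun p => p.1 == K)).map (·.2)).filter (fun v => v.1 == i)).map (·.2) =
      if s = i then
        (PySem.List.enumerate cs oc).filterMap
          (fun q => if PySem.Str.upper q.2 == K then some q.1 else none)
      else [] := by
  induction cs generalizing oc with
  | nil => simp [PySem.List.enumerate_nil]
  | cons c cs ihc =>
    simp only [PySem.List.enumerate_cons, List.map_cons, List.filter_cons, List.filterMap_cons]
    by_cases hs : s = i
    · subst hs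
      by_cases hK : PySem.Str.upper c = K <;> simp [hK, ihc (oc + 1)]
    · by_cases hK : PySem.Str.upper c = K <;> simp [hs, hK, ihc (oc + 1)]

theorem wantFilteredFrom (tbl : List (List String)) (o i : Int) (K : String) :
    (((((PySem.List.enumerate tbl o).flatMap
            (fun p => (PySem.List.enumerate p.2).map (fun q => (PySem.Str.upper q.2, (p.1, q.1))))).filter
          (fun p => p.1 == K)).map (·.2)).filter (fun v => v.1 == i)).map (·.2) =
      if o ≤ i then
        (match tbl[(i - o).toNat]? with
         | some c =>
             (PySem.List.enumerate c).filterMap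
               (fun q => if PySem.Str.upper q.2 == K then some q.1 else none)
         | none => [])
      else [] := by
  induction tbl generalizing o with
  | nil => simp [PySem.List.enumerate_nil]
  | cons c cs ihc =>
    simp only [PySem.List.enumerate_cons, List.flatMap_cons, List.filter_append, List.map_append]
    rw [ihc (o + 1)]
    have hblk := blockEq c 0 o i K
    simp only [] at hblk ⊢
    rw [hblk]
    by_cases heq : o = i
    · subst heq
      simp only [if_pos (le_refl o), if_neg (show ¬ o + 1 ≤ o by omega)]
      have hidx : (o - o).toNat = 0 := by omega
      simp
    · rw [if_neg heq, List.nil_append]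
      by_cases hle : o + 1 ≤ i
      · rw [if_pos hle, if_pos (show o ≤ i by omega)]
        have hidx : (i - o).toNat = (i - (o + 1)).toNat + 1 := by omega
        rw [hidx, List.getElem?_cons_succ]
      · rw [if_neg hle, if_neg (show ¬ o ≤ i by omega)]

-- B's per-slot value through the whole pipeline
theorem best_char (tbl : List (List String)) (raws : List String) (i : Int) :
    (bBuildBest (bBuildWant tbl) raws).get? i =
      if 0 ≤ i then foldBo (tbl.getD i.toNat []) raws 0 none else none := by
  rw [best_get?]
  have hjs : ∀ rcn : String,
      (((bBuildWant tbl).getD (PySem.Str.upper rcn) []).filter (fun p => p.1 == i)).map (·.2) =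
        if 0 ≤ i then jsList (tbl.getD i.toNat []) rcn 0 else [] := by
    intro rcn
    rw [want_getD]
    have h := wantFilteredFrom tbl 0 i (PySem.Str.upper rcn)
    simp only [Int.sub_zero] at h
    unfold wantPairs
    rw [h]
    by_cases h0 : 0 ≤ i
    · simp only [if_pos h0]
      cases hc : tbl[i.toNat]? with
      | some c =>
        have : tbl.getD i.toNat [] = c := by simp [List.getD, hc]
        rw [this]
        rfl
      | none =>
        have : tbl.getD i.toNat [] = [] := by simp [List.getD, hc]
        rw [this]
        simp [jsList, PySem.List.enumerate_nil]
    · simp [h0]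
  by_cases h0 : 0 ≤ i
  · simp only [hjs, if_pos h0]
    rfl
  · simp only [hjs, if_neg h0]
    simp

-- ---- keys of bBuildBest stay Nodup ----
theorem bInnerUpd_nodup (rcn : String) (b : PySem.Dict Int (Int × String)) (p : Int × Int)
    (h : b.keys.Nodup) : (bInnerUpd rcn b p).keys.Nodup := by
  unfold bInnerUpd
  cases b.get? p.1 with
  | none => exact PySem.Dict.nodup_keys_insert _ _ _ h
  | some c =>
    by_cases hlt : p.2 < c.1
    · simpa [hlt] using PySem.Dict.nodup_keys_insert b p.1 (p.2, rcn) h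
    · simpa [hlt] using h

theorem best_nodup (want : PySem.Dict String (List (Int × Int))) (raws : List String) :
    (bBuildBest want raws).keys.Nodup := by
  unfold bBuildBest
  have hinner : ∀ (rcn : String) (wl : List (Int × Int)) (b : PySem.Dict Int (Int × String)),
      b.keys.Nodup → (wl.foldl (bInnerUpd rcn) b).keys.Nodup := by
    intro rcn wl
    induction wl with
    | nil => intro b hb; exact hb
    | cons p ps ih => intro b hb; exact ih _ (bInnerUpd_nodup rcn b p hb)
  have houter : ∀ (rs : List String) (b : PySem.Dict Int (Int × String)), b.keys.Nodup →
      (rs.foldl (fun best rcn => (want.getD (PySem.Str.upper rcn) []).foldl (bInnerUpd rcn) best) b).keys.Nodup := by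
    intro rs
    induction rs with
    | nil => intro b hb; exact hb
    | cons r rs ih => intro b hb; exact ih _ (hinner r _ b hb)
  exact houter raws PySem.Dict.empty (by simp [PySem.Dict.keys_empty])

-- ---- no-match lemmas ----
theorem aScanRaw_none (name : String) (raws : List String)
    (h : ∀ rcn ∈ raws, PySem.Str.upper rcn ≠ PySem.Str.upper name) :
    aScanRaw name raws = none := by
  induction raws with
  | nil => rfl
  | cons r rs ih =>
    simp only [aScanRaw]
    rw [if_neg (by simpa using h r (by simp))]
    exact ih fun rcn hm => h rcn (by simp [hm])

theorem aScanNames_none (cands raws : List String)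
    (h : ∀ name ∈ cands, ∀ rcn ∈ raws, PySem.Str.upper rcn ≠ PySem.Str.upper name) :
    aScanNames cands raws = none := by
  induction cands with
  | nil => rfl
  | cons n ns ih =>
    simp only [aScanNames]
    rw [aScanRaw_none n raws (h n (by simp))]
    exact ih fun name hm => h name (by simp [hm])

theorem foldBo_eq_none_iff (cands raws : List String) :
    foldBo cands raws 0 none = none ↔ aScanNames cands raws = none := by
  rw [← aIdx_eq_foldBo, ← aIdx_map cands raws 0]
  cases aIdx cands raws 0 <;> simp

-- ---- assembling the output lists ----
theorem foldl_length_eq {α β : Type} (step : List α → β → List α)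
    (h : ∀ acc p, (step acc p).length = acc.length) :
    ∀ (l : List β) (acc : List α), (l.foldl step acc).length = acc.length := by
  intro l
  induction l with
  | nil => intro acc; rfl
  | cons p ps ih => intro acc; rw [List.foldl_cons, ih, h]

theorem LA (raws : List String) :
    ∀ (tbl : List (List String)) (o : Nat) (acc : List (Option String)),
      acc.length = 5 →
      (∀ k, (hk : k < tbl.length) → 5 ≤ o + k → aScanNames tbl[k] raws = none) →
      ∀ (n : Nat), n < 5 →
      ((PySem.List.enumerate tbl (o : Int)).foldl
        (fun chnNames p =>
          if p.2 ≠ [] then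
            match aScanNames p.2 raws with
            | some r => chnNames.set p.1.toNat (some r)
            | none => chnNames
          else chnNames) acc)[n]? =
        if o ≤ n ∧ n - o < tbl.length then
          match aScanNames (tbl.getD (n - o) []) raws with
          | some r => some (some r)
          | none => acc[n]?
        else acc[n]? := by
  intro tbl
  induction tbl with
  | nil =>
    intro o acc hacc hP n hn
    rw [if_neg (by simp only [List.length_nil]; omega)]
    rfl
  | cons c cs ih =>
    intro o acc hacc hP n hn
    rw [PySem.List.enumerate_cons, List.foldl_cons]
    have hstep : (if c ≠ [] then
          match aScanNames c raws with
          | some r => acc.set ((o : Int)).toNat (some r)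
          | none => acc
        else acc) =
        match aScanNames c raws with
        | some r => acc.set o (some r)
        | none => acc := by
      by_cases hc : c = []
      · subst hc; simp [aScanNames]
      · simp [hc]
    simp only [] at hstep ⊢
    rw [hstep]
    have hcast : (o : Int) + 1 = ((o + 1 : Nat) : Int) := by push_cast; ring
    rw [hcast]
    have hP' : ∀ k, (hk : k < cs.length) → 5 ≤ (o + 1) + k → aScanNames cs[k] raws = none := by
      intro k hk h5
      have := hP (k + 1) (by simpa using Nat.succ_lt_succ hk) (by omega)
      simpa using this
    have hlen' : (match aScanNames c raws with
        | some r => acc.set o (some r)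
        | none => acc).length = 5 := by
      cases aScanNames c raws <;> simp [hacc]
    rw [ih (o + 1) _ hlen' hP' n hn]
    by_cases hno : n = o
    · subst hno
      rw [if_neg (by omega), if_pos (by simp only [List.length_cons]; omega)]
      have h0 : n - n = 0 := by omega
      rw [h0]
      cases haS : aScanNames c raws with
      | some r => simp [haS, hacc, hn]
      | none => simp [haS]
    · have hkeep : (match aScanNames c raws with
          | some r => acc.set o (some r)
          | none => acc)[n]? = acc[n]? := by
        cases haS : aScanNames c raws with
        | some r => rw [List.getElem?_set, if_neg (show ¬ o = n from fun h => hno h.symm)]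
        | none => rfl
      by_cases hlt : n < o
      · rw [if_neg (by omega), if_neg (by omega)]
        exact hkeep
      · have hgt : o < n := by omega
        have hgd : cs.getD (n - (o + 1)) [] = (c :: cs).getD (n - o) [] := by
          have h1 : n - o = (n - (o + 1)) + 1 := by omega
          rw [h1]
          rfl
        by_cases hin : o + 1 ≤ n ∧ n - (o + 1) < cs.length
        · rw [if_pos hin, if_pos (by simp only [List.length_cons]; omega), ← hgd]
          cases h2 : aScanNames (cs.getD (n - (o + 1)) []) raws with
          | some r2 => rfl
          | none => exact hkeep
        · rw [if_neg hin, if_neg (by simp only [List.length_cons]; omega)]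
          exact hkeep

theorem LB :
    ∀ (l : List (Int × (Int × String))) (acc : List (Option String)),
      (l.map (·.1)).Nodup →
      (∀ p ∈ l, 0 ≤ p.1 ∧ p.1 < 5) →
      acc.length = 5 →
      ∀ (n : Nat), n < 5 →
      (l.foldl (fun chnNames p => chnNames.set p.1.toNat (some p.2.2)) acc)[n]? =
        match l.find? (fun p => p.1 == (n : Int)) with
        | some p => some (some p.2.2)
        | none => acc[n]? := by
  intro l
  induction l with
  | nil => intro acc _ _ _ n hn; rfl
  | cons p ps ih =>
    intro acc hnd hb hacc n hn
    obtain ⟨hp0, hp5⟩ := hb p (by simp)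
    rw [List.map_cons, List.nodup_cons] at hnd
    obtain ⟨hndh, hndt⟩ := hnd
    simp only [List.foldl_cons, List.find?_cons]
    rw [ih _ hndt (fun q hq => hb q (by simp [hq])) (by simp [hacc]) n hn]
    by_cases hpn : p.1 = (n : Int)
    · have hbeq : (p.1 == (n : Int)) = true := by simpa using hpn
      rw [hbeq]
      have hfnone : ps.find? (fun q => q.1 == (n : Int)) = none := by
        rw [List.find?_eq_none]
        intro q hq hqq
        exact hndh (by
          have : q.1 = p.1 := by rw [hpn]; simpa using hqq
          exact this ▸ List.mem_map_of_mem hq)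
      rw [hfnone]
      have hton : p.1.toNat = n := by omega
      simp [hton, hacc, hn]
    · have hbeq : (p.1 == (n : Int)) = false := by simpa using hpn
      rw [hbeq]
      have hton : ¬ p.1.toNat = n := by omega
      cases ps.find? (fun q => q.1 == (n : Int)) with
      | some q => rfl
      | none => simp [hton]

-- the initial list and its entries
theorem init5_getElem (n : Nat) (hn : n < 5) :
    ([none, none, none, none, none] : List (Option String))[n]? = some none := by
  interval_cases n <;> rfl

theorem getExistChn_spec : Claim_equal_getExistChn := by
  intro tbl raws _ hpre
  unfold Spec_getExistChn
  have hpre' : ∀ k, (hk : k < tbl.length) → 5 ≤ k → aScanNames tbl[k] raws = none := by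
    intro k hk h5
    apply aScanNames_none
    intro name hnm rcn hrc
    refine hpre tbl[k] ?_ name hnm rcn hrc
    have h1 : (tbl.drop 5)[k - 5]'(by simp only [List.length_drop]; omega) = tbl[k] := by
      rw [List.getElem_drop]
      congr 1
      omega
    exact h1 ▸ List.getElem_mem _
  have hlenA : (getExistChn tbl raws).length = 5 := by
    unfold getExistChn
    apply foldl_length_eq
    intro acc p
    by_cases hc : p.2 = []
    · simp [hc]
    · cases h : aScanNames p.2 raws <;> simp [hc]
  have hlenB : (getExistChn_alt tbl raws).length = 5 := by
    unfold getExistChn_alt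
    apply foldl_length_eq
    intro acc p
    simp [List.length_set]
  have hnodup := best_nodup (bBuildWant tbl) raws
  have hbound : ∀ p ∈ (bBuildBest (bBuildWant tbl) raws).items, 0 ≤ p.1 ∧ p.1 < 5 := by
    intro p hp
    obtain ⟨pk, pv⟩ := p
    have hg : (bBuildBest (bBuildWant tbl) raws).get? pk = some pv :=
      PySem.Dict.get?_of_mem_items _ hp hnodup
    rw [best_char] at hg
    by_cases h0 : 0 ≤ pk
    · refine ⟨h0, ?_⟩
      by_contra h5
      have h5' : 5 ≤ pk.toNat := by omega
      have hnone : foldBo (tbl.getD pk.toNat []) raws 0 none = none := by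
        rw [foldBo_eq_none_iff]
        by_cases hlen : pk.toNat < tbl.length
        · have hgd : tbl.getD pk.toNat [] = tbl[pk.toNat] := by
            rw [List.getD_eq_getElem?_getD, List.getElem?_eq_getElem hlen]
            rfl
          rw [hgd]
          apply aScanNames_none
          intro name hnm rcn hrc
          refine hpre tbl[pk.toNat] ?_ name hnm rcn hrc
          have h1 : (tbl.drop 5)[pk.toNat - 5]'(by simp only [List.length_drop]; omega) = tbl[pk.toNat] := by
            rw [List.getElem_drop]
            congr 1
            omega
          exact h1 ▸ List.getElem_mem _
        · have hgd : tbl.getD pk.toNat [] = [] := List.getD_eq_default _ _ (by omega)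
          rw [hgd]
          rfl
      rw [if_pos h0, hnone] at hg
      cases hg
    · rw [if_neg h0] at hg
      cases hg
  apply List.ext_getElem?
  intro n
  by_cases hn : n < 5
  · have hA := LA raws tbl 0 [none, none, none, none, none] rfl
      (by intro k hk h5; exact hpre' k hk (by omega)) n hn
    rw [Nat.cast_zero] at hA
    have hLHS : (getExistChn tbl raws)[n]? =
        if n < tbl.length then
          match aScanNames (tbl.getD n []) raws with
          | some r => some (some r)
          | none => some none
        else some none := by
      unfold getExistChn
      rw [hA]
      by_cases hc : n < tbl.length
      · rw [if_pos (show 0 ≤ n ∧ n - 0 < tbl.length by omega), if_pos hc]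
        cases aScanNames (tbl.getD n []) raws
        · rw [init5_getElem n hn]
        · rfl
      · rw [if_neg (show ¬ (0 ≤ n ∧ n - 0 < tbl.length) by omega), if_neg hc,
            init5_getElem n hn]
    have hB := LB (bBuildBest (bBuildWant tbl) raws).items [none, none, none, none, none]
      (by simpa [PySem.Dict.keys] using hnodup) hbound rfl n hn
    have hget : (bBuildBest (bBuildWant tbl) raws).get? (n : Int) =
        ((bBuildBest (bBuildWant tbl) raws).items.find? (fun p => p.1 == (n : Int))).map (·.2) := rfl
    have hRHS : (getExistChn_alt tbl raws)[n]? =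
        match (bBuildBest (bBuildWant tbl) raws).get? (n : Int) with
        | some v => some (some v.2)
        | none => some none := by
      unfold getExistChn_alt
      simp only []
      rw [hB, hget]
      cases (bBuildBest (bBuildWant tbl) raws).items.find? (fun p => p.1 == (n : Int))
      · rw [init5_getElem n hn]
        rfl
      · rfl
    have hper : (foldBo (tbl.getD n []) raws 0 none).map (·.2) =
        aScanNames (tbl.getD n []) raws := by
      rw [← aIdx_eq_foldBo, aIdx_map]
    have hcore : (if n < tbl.length then
          match aScanNames (tbl.getD n []) raws with
          | some r => some (some r)
          | none => some none
        else some none) =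
        (match (bBuildBest (bBuildWant tbl) raws).get? (n : Int) with
         | some v => some (some v.2)
         | none => (some none : Option (Option String))) := by
      rw [best_char, if_pos (show (0 : Int) ≤ (n : Int) from Int.natCast_nonneg n)]
      have hton : ((n : Int)).toNat = n := by omega
      rw [hton]
      cases hfb : foldBo (tbl.getD n []) raws 0 none with
      | none =>
        have haS : aScanNames (tbl.getD n []) raws = none := by
          rw [← hper, hfb]; rfl
        rw [haS]
        by_cases hc : n < tbl.length
        · rw [if_pos hc]
        · rw [if_neg hc]
      | some v =>
        have haS : aScanNames (tbl.getD n []) raws = some v.2 := by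
          rw [← hper, hfb]; rfl
        rw [haS]
        have hc : n < tbl.length := by
          by_contra hc
          have hgd : tbl.getD n [] = [] := List.getD_eq_default _ _ (by omega)
          rw [hgd] at haS
          cases haS
        rw [if_pos hc]
    rw [hLHS, hRHS]
    exact hcore
  · rw [List.getElem?_eq_none (by omega), List.getElem?_eq_none (by omega)]
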